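-- pv_equiv track=rewrite | github.com/crapas/ep | 031_060/043/43.py | make_pd
-- ===== SOURCE A (Python) =====
-- def make_pd(num_str, i):
-- 	result = []
-- 	temp_list = []
-- 	for x in range(len(num_str)):
-- 		temp_list.append(num_str[:x + 1] + str(i) + num_str[x + 1:])
-- 	if i != 0:
-- 		temp_list.append(str(i) + num_str)
-- 	if i == 0:
-- 		return temp_list
-- 	else:
-- 		for l in temp_list:
-- 			result = result + make_pd(l, i - 1)
-- 	return result
-- ===== SOURCE B (Python) =====
-- def _expand(s, j):
--     out = [s[:x + 1] + str(j) + s[x + 1:] for x in range(len(s))]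
--     if j != 0:
--         out.append(str(j) + s)
--     return out
--
--
-- def make_pd(num_str, i):
--     current = [num_str]
--     for j in range(i, -1, -1):
--         current = [t for s in current for t in _expand(s, j)]
--     return current
-- ===== Notes on version B (the rewrite author's own statement) =====
-- stated objective: alternative
-- what changed: Replaces the DFS tree recursion by an iterative level-by-level (BFS) worklist expansion over j = i..0; since all leaves sit at the same depth, the level order equals A's recursive leaf order.
import Mathlib
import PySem

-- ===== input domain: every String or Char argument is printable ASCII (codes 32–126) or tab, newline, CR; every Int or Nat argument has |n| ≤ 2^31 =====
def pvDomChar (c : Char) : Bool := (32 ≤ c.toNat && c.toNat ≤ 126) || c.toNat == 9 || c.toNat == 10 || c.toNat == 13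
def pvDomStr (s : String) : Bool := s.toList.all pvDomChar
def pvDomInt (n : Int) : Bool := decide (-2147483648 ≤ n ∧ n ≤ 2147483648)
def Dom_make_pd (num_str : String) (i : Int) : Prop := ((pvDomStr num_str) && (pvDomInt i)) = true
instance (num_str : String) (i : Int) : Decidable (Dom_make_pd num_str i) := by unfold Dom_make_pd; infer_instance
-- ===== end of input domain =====

-- B replaces A's DFS tree recursion by an iterative level-by-level worklist expansion (alternative decomposition, same cost).

-- ===== PORT A =====
-- fuel = recursion depth; the Python recursion terminates exactly when i ≥ 0, and
-- make_pd passes fuel = i.toNat, which the proof shows is always enough on Pre_.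
def make_pdFuel : Nat → String → Int → List String
  | fuel, num_str, i =>
    let temp_list := (PySem.List.pyRange 0 (PySem.Str.len num_str) 1).foldl
      (fun acc x =>
        acc ++ [PySem.Str.slice num_str none (some (x + 1)) ++ PySem.Int.toStr i
                ++ PySem.Str.slice num_str (some (x + 1)) none]) []
    let temp_list := if i ≠ 0 then temp_list ++ [PySem.Int.toStr i ++ num_str] else temp_list
    if i == 0 then temp_list
    else
      match fuel with
      | 0 => []           -- unreachable under Pre_ (fuel = i.toNat covers the depth)
      | fuel + 1 => temp_list.foldl (fun result l => result ++ make_pdFuel fuel l (i - 1)) []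

def make_pd (num_str : String) (i : Int) : List String := make_pdFuel i.toNat num_str i

-- ===== PORT B =====
def pdExpand (s : String) (j : Int) : List String :=
  (PySem.List.pyRange 0 (PySem.Str.len s) 1).map
    (fun x => PySem.Str.slice s none (some (x + 1)) ++ PySem.Int.toStr j
              ++ PySem.Str.slice s (some (x + 1)) none)
  ++ (if j ≠ 0 then [PySem.Int.toStr j ++ s] else [])

def make_pd_alt (num_str : String) (i : Int) : List String :=
  (PySem.List.pyRange i (-1) (-1)).foldl
    (fun current j => current.flatMap (fun s => pdExpand s j)) [num_str]

-- ===== PRECONDITION & SPEC =====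
-- Pre_ excludes i < 0, on which the Python A recurses without a base case (RecursionError).
def Pre_make_pd (num_str : String) (i : Int) : Prop := 0 ≤ i
instance (num_str : String) (i : Int) : Decidable (Pre_make_pd num_str i) := by
  unfold Pre_make_pd; infer_instance

def pvWitness_make_pd : String × Int := ("91", 2)

def Spec_make_pd (num_str : String) (i : Int) (out : List String) : Prop := out = make_pd_alt num_str i
instance (num_str : String) (i : Int) (out : List String) : Decidable (Spec_make_pd num_str i out) := by
  unfold Spec_make_pd; infer_instance

-- ===== CLAIM (what is proved, stated in full; the proofs are below) =====
def Claim_equal_make_pd : Prop := ∀ (num_str : String) (i : Int), Dom_make_pd num_str i → Pre_make_pd num_str i → Spec_make_pd num_str i (make_pd num_str i)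

-- ===== LEMMAS AND PROOFS =====

-- A's temp_list equals one B-expansion step of a single string.
theorem tempA_eq_pdExpand (s : String) (i : Int) :
    ((if i ≠ 0 then
        ((PySem.List.pyRange 0 (PySem.Str.len s) 1).foldl
          (fun acc x =>
            acc ++ [PySem.Str.slice s none (some (x + 1)) ++ PySem.Int.toStr i
                    ++ PySem.Str.slice s (some (x + 1)) none]) [])
        ++ [PySem.Int.toStr i ++ s]
      else
        (PySem.List.pyRange 0 (PySem.Str.len s) 1).foldl
          (fun acc x =>
            acc ++ [PySem.Str.slice s none (some (x + 1)) ++ PySem.Int.toStr i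
                    ++ PySem.Str.slice s (some (x + 1)) none]) [])) = pdExpand s i := by
  rw [pdExpand, PySem.List.foldl_append_singleton_eq_map]
  split_ifs with h <;> simp

-- B's fold over the remaining levels distributes over the worklist as a flatMap.
theorem foldl_levels_flatMap (ls : List Int) :
    ∀ cur : List String,
      ls.foldl (fun current j => current.flatMap (fun s => pdExpand s j)) cur
        = cur.flatMap (fun t =>
            ls.foldl (fun current j => current.flatMap (fun s => pdExpand s j)) [t]) := by
  induction ls with
  | nil => intro cur; simp
  | cons j ls ih =>
    intro cur
    simp only [List.foldl_cons]
    rw [ih (cur.flatMap (fun s => pdExpand s j)), List.flatMap_assoc]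
    refine List.flatMap_congr ?_  -- pointwise
    intro t _
    rw [← ih (pdExpand t j)]
    simp

-- Main invariant: with enough fuel, A's recursion from a single string equals B's level fold.
theorem fuel_eq_levels : ∀ (fuel : Nat) (i : Int) (s : String), 0 ≤ i → i.toNat ≤ fuel →
    make_pdFuel fuel s i
      = (PySem.List.pyRange i (-1) (-1)).foldl
          (fun current j => current.flatMap (fun t => pdExpand t j)) [s] := by
  intro fuel
  induction fuel with
  | zero =>
    intro i s hi hf
    have : i = 0 := by omega
    subst this
    rw [PySem.List.pyRange_neg_one_cons (by norm_num), PySem.List.pyRange_neg_one_eq_nil (by norm_num)]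
    simp only [List.foldl_cons, List.foldl_nil, List.flatMap_cons, List.flatMap_nil, List.append_nil]
    rw [make_pdFuel]
    simpa using (tempA_eq_pdExpand s 0)
  | succ fuel ih =>
    intro i s hi hf
    rcases eq_or_lt_of_le hi with h0 | hpos
    · -- i = 0
      subst h0
      rw [PySem.List.pyRange_neg_one_cons (by norm_num), PySem.List.pyRange_neg_one_eq_nil (by norm_num)]
      simp only [List.foldl_cons, List.foldl_nil, List.flatMap_cons, List.flatMap_nil, List.append_nil]
      rw [make_pdFuel]
      simpa using (tempA_eq_pdExpand s 0)
    · -- i > 0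
      have htemp := tempA_eq_pdExpand s i
      rw [if_pos (by omega : i ≠ 0)] at htemp
      rw [make_pdFuel]
      simp only [if_pos (by omega : i ≠ 0), if_neg (by simp; omega : ¬ (i == 0) = true)]
      rw [htemp, PySem.List.foldl_append_eq_flatMap, List.nil_append]
      have hihall : ∀ l, make_pdFuel fuel l (i - 1)
          = (PySem.List.pyRange (i - 1) (-1) (-1)).foldl
              (fun current j => current.flatMap (fun t => pdExpand t j)) [l] := by
        intro l
        exact ih (i - 1) l (by omega) (by omega)
      rw [PySem.List.pyRange_neg_one_cons (by omega : (-1 : Int) < i)]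
      simp only [List.foldl_cons, List.flatMap_cons, List.flatMap_nil, List.append_nil]
      rw [foldl_levels_flatMap]
      exact List.flatMap_congr (fun l _ => hihall l)

-- ===== VERDICT (by name: the statement is the Claim_ definition above) =====
theorem make_pd_spec : Claim_equal_make_pd := by
  intro num_str i _ hpre
  unfold Spec_make_pd make_pd make_pd_alt
  exact fuel_eq_levels i.toNat i num_str hpre (by omega)
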